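-- pv_equiv track=rewrite | github.com/thehalleyyoung/halley-labs | refinement-type-inference-dynamic-lang/implementation/src/_experimental/incremental/tracker.py | compute_predicate_delta
-- ===== SOURCE A (Python) =====
-- from typing import (
--     Any,
--     AsyncIterator,
--     Callable,
--     Deque,
--     Dict,
--     FrozenSet,
--     Generic,
--     Iterable,
--     Iterator,
--     List,
--     Mapping,
--     Optional,
--     Sequence,
--     Set,
--     Tuple,
--     TypeVar,
--     Union,
-- )
--
-- def compute_predicate_delta(
--
--     old_preds: Dict[str, Set[str]],
--     new_preds: Dict[str, Set[str]],
-- ) -> Set[str]: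
--     """
--     Compute the set of predicates that changed (added, removed, or
--     associated with a different set of functions).
--     """
--     all_preds: Set[str] = set()
--     for ps in old_preds.values():
--         all_preds |= ps
--     for ps in new_preds.values():
--         all_preds |= ps
--
--     changed: Set[str] = set()
--     for pred in all_preds:
--         old_funcs = {f for f, ps in old_preds.items() if pred in ps}
--         new_funcs = {f for f, ps in new_preds.items() if pred in ps}
--         if old_funcs != new_funcs:
--             changed.add(pred)
--     return changed
-- ===== SOURCE B (Python) =====
-- def compute_predicate_delta(old_preds, new_preds):
--     """
--     Compute the set of predicates that changed (added, removed, or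
--     associated with a different set of functions).
--
--     Builds inverted pred -> functions indexes in one pass over each dict,
--     then compares per predicate: O(total associations) instead of O(P*F).
--     """
--     old_idx = {}
--     for f, ps in old_preds.items():
--         for p in ps:
--             old_idx.setdefault(p, set()).add(f)
--     new_idx = {}
--     for f, ps in new_preds.items():
--         for p in ps:
--             new_idx.setdefault(p, set()).add(f)
--     return {p for p in old_idx.keys() | new_idx.keys()
--             if old_idx.get(p, set()) != new_idx.get(p, set())}
-- ===== Notes on version B (the rewrite author's own statement) =====
-- stated objective: faster
-- what changed: Instead of rescanning both whole dicts once per predicate to rebuild its function set, B builds inverted pred->functions indexes in a single pass over each dict and then compares the two indexed sets per predicate.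
import Mathlib
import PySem

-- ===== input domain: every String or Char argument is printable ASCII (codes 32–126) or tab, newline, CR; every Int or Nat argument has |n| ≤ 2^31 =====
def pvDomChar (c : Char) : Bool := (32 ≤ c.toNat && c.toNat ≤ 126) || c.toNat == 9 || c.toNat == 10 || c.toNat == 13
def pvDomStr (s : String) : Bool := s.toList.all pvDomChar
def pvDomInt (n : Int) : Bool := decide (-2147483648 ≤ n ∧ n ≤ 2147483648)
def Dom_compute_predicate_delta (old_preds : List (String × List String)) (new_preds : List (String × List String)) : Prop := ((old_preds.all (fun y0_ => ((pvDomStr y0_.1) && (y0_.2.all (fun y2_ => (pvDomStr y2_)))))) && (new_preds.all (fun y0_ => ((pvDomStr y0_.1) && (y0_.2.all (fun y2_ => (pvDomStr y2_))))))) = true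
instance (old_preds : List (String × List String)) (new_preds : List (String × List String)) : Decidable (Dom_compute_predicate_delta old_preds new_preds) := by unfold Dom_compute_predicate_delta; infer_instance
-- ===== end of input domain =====

-- B replaces A's per-predicate rescan of both whole dicts by one-pass inverted
-- pred->functions indexes, compared per predicate (objective: faster).

-- ===== PORT A =====
-- A: union all predicate sets, then for each predicate recompute its old/new
-- function sets by scanning all dict items, and collect those that changed.
def compute_predicate_delta (old_preds : List (String × List String)) (new_preds : List (String × List String)) : List String :=
  let all1 : PySem.Set String :=
    old_preds.foldl (fun s pr => PySem.Set.union s pr.2) PySem.Set.empty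
  let all_preds : PySem.Set String :=
    new_preds.foldl (fun s pr => PySem.Set.union s pr.2) all1
  all_preds.foldl (fun changed pred =>
    let old_funcs : PySem.Set String :=
      PySem.Set.ofList ((old_preds.filter (fun pr => pr.2.contains pred)).map (·.1))
    let new_funcs : PySem.Set String :=
      PySem.Set.ofList ((new_preds.filter (fun pr => pr.2.contains pred)).map (·.1))
    if PySem.Set.equal old_funcs new_funcs then changed else PySem.Set.add changed pred)
    PySem.Set.empty

-- ===== PORT B =====
-- B helper: one pass over the dict items building pred -> set of functions
-- (Python: old_idx.setdefault(p, set()).add(f)).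
def pvBuildIdx (preds : List (String × List String)) : PySem.Dict String (PySem.Set String) :=
  preds.foldl (fun d pr =>
    pr.2.foldl (fun d q =>
      d.insert q (PySem.Set.add (d.getD q PySem.Set.empty) pr.1)) d)
    PySem.Dict.empty

def compute_predicate_delta_alt (old_preds : List (String × List String)) (new_preds : List (String × List String)) : List String :=
  let old_idx := pvBuildIdx old_preds
  let new_idx := pvBuildIdx new_preds
  (PySem.Set.union old_idx.keys new_idx.keys).foldl (fun changed p =>
    if PySem.Set.equal (old_idx.getD p PySem.Set.empty) (new_idx.getD p PySem.Set.empty)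
    then changed else PySem.Set.add changed p)
    PySem.Set.empty

-- ===== PRECONDITION & SPEC =====
def Spec_compute_predicate_delta (old_preds : List (String × List String)) (new_preds : List (String × List String)) (out : List String) : Prop := out = compute_predicate_delta_alt old_preds new_preds
instance (old_preds : List (String × List String)) (new_preds : List (String × List String)) (out : List String) : Decidable (Spec_compute_predicate_delta old_preds new_preds out) := by unfold Spec_compute_predicate_delta; infer_instance

-- ===== CLAIM (what is proved, stated in full; the proofs are below) =====
def Claim_equal_compute_predicate_delta : Prop := ∀ (old_preds : List (String × List String)) (new_preds : List (String × List String)), Dom_compute_predicate_delta old_preds new_preds → Spec_compute_predicate_delta old_preds new_preds (compute_predicate_delta old_preds new_preds)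

-- ===== LEMMAS AND PROOFS =====

lemma pv_union_eq_update (s t : List String) :
    PySem.Set.union s t = PySem.Set.update s t := rfl

-- effect of one dict item (f, ps) of the index-building loop on the entry at p
lemma pv_idx_inner_getD (f p : String) (ps : List String) (d : PySem.Dict String (PySem.Set String)) :
    (ps.foldl (fun d q => d.insert q (PySem.Set.add (d.getD q PySem.Set.empty) f)) d).getD p PySem.Set.empty
    = if ps.contains p then PySem.Set.add (d.getD p PySem.Set.empty) f
      else d.getD p PySem.Set.empty := by
  induction ps generalizing d with
  | nil => simp
  | cons q ps ih =>
    simp only [List.foldl_cons, ih]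
    by_cases h : p = q
    · subst h
      simp [PySem.Dict.getD_insert_self]
    · simp [PySem.Dict.getD_insert_of_ne _ _ _ h, h]

-- the index entry at p is exactly A's recomputed function set for p
lemma pv_idx_getD (preds : List (String × List String)) (p : String) :
    (pvBuildIdx preds).getD p PySem.Set.empty
    = PySem.Set.ofList ((preds.filter (fun pr => pr.2.contains p)).map (·.1)) := by
  have gen : ∀ (l : List (String × List String)) (d : PySem.Dict String (PySem.Set String)),
      (l.foldl (fun d pr =>
        pr.2.foldl (fun d q => d.insert q (PySem.Set.add (d.getD q PySem.Set.empty) pr.1)) d) d).getD p PySem.Set.empty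
      = l.foldl (fun acc pr => if pr.2.contains p then PySem.Set.add acc pr.1 else acc)
          (d.getD p PySem.Set.empty) := by
    intro l
    induction l with
    | nil => intro d; simp
    | cons pr l ih =>
      intro d
      simp only [List.foldl_cons, ih, pv_idx_inner_getD]
  rw [pvBuildIdx, gen]
  simp only [PySem.Set.ofList_eq_foldl, List.foldl_map, List.foldl_filter]
  rfl

-- keys of the index = fold of set-updates over the value lists
lemma pv_idx_keys (preds : List (String × List String)) :
    (pvBuildIdx preds).keys
    = preds.foldl (fun s pr => PySem.Set.update s pr.2) PySem.Set.empty := by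
  have gen : ∀ (l : List (String × List String)) (d : PySem.Dict String (PySem.Set String)),
      (l.foldl (fun d pr =>
        pr.2.foldl (fun d q => d.insert q (PySem.Set.add (d.getD q PySem.Set.empty) pr.1)) d) d).keys
      = l.foldl (fun s pr => PySem.Set.update s pr.2) d.keys := by
    intro l
    induction l with
    | nil => intro d; rfl
    | cons pr l ih =>
      intro d
      simp only [List.foldl_cons, ih, PySem.Dict.keys_foldl_insert]
  rw [pvBuildIdx, gen]
  rfl

lemma pv_update_add (s t : PySem.Set String) (x : String) :
    PySem.Set.update s (PySem.Set.add t x) = PySem.Set.add (PySem.Set.update s t) x := by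
  by_cases h : x ∈ t
  · rw [PySem.Set.add_of_mem h, PySem.Set.add_of_mem ((PySem.Set.mem_update _ _ _).mpr (Or.inr h))]
  · rw [PySem.Set.add_of_not_mem h, PySem.Set.update_append]
    rfl

lemma pv_update_update (s t : PySem.Set String) (l : List String) :
    PySem.Set.update s (PySem.Set.update t l)
    = PySem.Set.update (PySem.Set.update s t) l := by
  induction l generalizing t with
  | nil => rfl
  | cons x l ih =>
    rw [PySem.Set.update_cons, ih, pv_update_add, PySem.Set.update_cons]

lemma pv_foldl_update_flat (l : List (String × List String)) (s : PySem.Set String) :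
    l.foldl (fun s pr => PySem.Set.update s pr.2) s
    = PySem.Set.update s (l.flatMap (·.2)) := by
  induction l generalizing s with
  | nil => rfl
  | cons pr l ih =>
    rw [List.foldl_cons, ih, List.flatMap_cons, PySem.Set.update_append]

-- the iteration lists of the two ports coincide
lemma pv_all_preds_eq (old_preds new_preds : List (String × List String)) :
    new_preds.foldl (fun s pr => PySem.Set.union s pr.2)
      (old_preds.foldl (fun s pr => PySem.Set.union s pr.2) PySem.Set.empty)
    = PySem.Set.union (pvBuildIdx old_preds).keys (pvBuildIdx new_preds).keys := by
  simp only [pv_union_eq_update, pv_idx_keys, pv_foldl_update_flat]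
  rw [pv_update_update]
  rfl

-- ===== VERDICT (by name: the statement is the Claim_ definition above) =====
theorem compute_predicate_delta_spec : Claim_equal_compute_predicate_delta := by
  intro old_preds new_preds _
  show compute_predicate_delta old_preds new_preds = compute_predicate_delta_alt old_preds new_preds
  simp only [compute_predicate_delta, compute_predicate_delta_alt, pv_idx_getD,
    pv_all_preds_eq]
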